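-- pv_equiv track=rewrite | github.com/pypi-data/pypi-mirror-325 | packages/movemeter/movemeter-0.7.2-py3-none-any.whl/movemeter/scriptify_emdedtk.py | purge_main
-- ===== SOURCE A (Python) =====
-- def purge_main(sources):
--     '''Remove main sections for the given code
--     '''
--     newsource = []
--     for source in sources:
--         newsource.append([])
--         for line in source.split('\n'):
--             if line.startswith('def main(') and line.endswith('):'):
--                 break
--             if '__name__' in line and '__main__' in line:
--                 break
--
--             newsource[-1].append(line)
--
--         newsource[-1] = '\n'.join(newsource[-1])
--     return newsource
-- ===== SOURCE B (Python) =====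
-- def purge_main(sources):
--     '''Remove main sections for the given code
--     '''
--     def is_marker(line):
--         return (line.startswith('def main(') and line.endswith('):')) or \
--                ('__name__' in line and '__main__' in line)
--
--     result = []
--     for source in sources:
--         # Scan the raw string line by line via partition, tracking the character
--         # offset 'pos' of the current line; never build a list of lines.
--         cut = None
--         pos = 0
--         rest = source
--         while True:
--             head, sep, rest = rest.partition('\n')
--             if is_marker(head):
--                 cut = pos
--                 break
--             if not sep:
--                 break
--             pos += len(head) + 1
--         # Slice the original string just before the marker line (drop its preceding '\n').
--         result.append(source if cut is None else source[:max(cut - 1, 0)])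
--     return result
-- ===== Notes on version B (the rewrite author's own statement) =====
-- stated objective: alternative
-- what changed: Instead of splitting each source into a list of lines and joining the kept lines back with newlines, B never materialises a line list: it walks the raw string with str.partition tracking the character offset of each line, and returns a single slice of the original string ending just before the first main-marker line (or the whole string).
import Mathlib
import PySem

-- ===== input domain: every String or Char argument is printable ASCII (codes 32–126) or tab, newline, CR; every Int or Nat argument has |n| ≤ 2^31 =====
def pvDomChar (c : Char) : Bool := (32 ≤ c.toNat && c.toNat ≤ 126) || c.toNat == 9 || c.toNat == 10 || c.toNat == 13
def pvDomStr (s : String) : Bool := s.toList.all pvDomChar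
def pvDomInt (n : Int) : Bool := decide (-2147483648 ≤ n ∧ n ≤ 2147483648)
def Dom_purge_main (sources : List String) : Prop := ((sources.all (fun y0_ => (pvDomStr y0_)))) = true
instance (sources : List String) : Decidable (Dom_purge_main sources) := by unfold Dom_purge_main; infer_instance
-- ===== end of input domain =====

-- B never builds a line list: it scans the raw string with partition tracking a character
-- offset and returns one slice of the original source (objective: alternative).

-- ===== PORT A =====
-- inner 'for line in source.split("\n")' loop with its two break conditions, appending kept lines
def pvALoop : List String → List String
  | [] => []
  | l :: rest =>
    if PySem.Str.startswith l "def main(" && PySem.Str.endswith l "):" then []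
    else if PySem.Str.isIn "__name__" l && PySem.Str.isIn "__main__" l then []
    else l :: pvALoop rest

def purge_main (sources : List String) : List String :=
  sources.foldl (fun newsource source =>
    newsource ++ [PySem.Str.join "\n" (pvALoop ((PySem.Str.split? source "\n").getD []))]) []

-- ===== PORT B =====
def pvIsMarkerC (line : List Char) : Bool :=
  (PySem.Chars.startswith line "def main(".toList && PySem.Chars.endswith line "):".toList) ||
  (PySem.Chars.isIn "__name__".toList line && PySem.Chars.isIn "__main__".toList line)

-- Source B's while loop: 'head, sep, rest = rest.partition('\n')' ported by hand (exact for the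
-- one-char separator: head = chars before the first '\n'; 'not sep' ↔ no '\n' in rest).
def pvFindCut (pos : Nat) (rest : List Char) : Option Nat :=
  if pvIsMarkerC (rest.takeWhile (· ≠ '\n')) then some pos
  else if (rest.takeWhile (· ≠ '\n')).length = rest.length then none
  else pvFindCut (pos + (rest.takeWhile (· ≠ '\n')).length + 1)
        (rest.drop ((rest.takeWhile (· ≠ '\n')).length + 1))
termination_by rest.length
decreasing_by
  have := (List.takeWhile_prefix (l := rest) (fun c => decide (c ≠ '\n'))).length_le
  simp only [List.length_drop]
  omega

def purge_main_alt (sources : List String) : List String :=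
  sources.map (fun source =>
    match pvFindCut 0 source.toList with
    | none => source
    | some cut => String.ofList (source.toList.take (cut - 1)))  -- Nat '-' is max(cut-1, 0)

-- ===== PRECONDITION & SPEC =====
def Spec_purge_main (sources : List String) (out : List String) : Prop := out = purge_main_alt sources
instance (sources : List String) (out : List String) : Decidable (Spec_purge_main sources out) := by unfold Spec_purge_main; infer_instance

-- ===== CLAIM (what is proved, stated in full; the proofs are below) =====
def Claim_equal_purge_main : Prop := ∀ (sources : List String), Dom_purge_main sources → Spec_purge_main sources (purge_main sources)

-- ===== LEMMAS AND PROOFS =====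

-- char-level mirror of A's inner loop
def pvALoopC : List (List Char) → List (List Char)
  | [] => []
  | l :: rest =>
    if PySem.Chars.startswith l "def main(".toList && PySem.Chars.endswith l "):".toList then []
    else if PySem.Chars.isIn "__name__".toList l && PySem.Chars.isIn "__main__".toList l then []
    else l :: pvALoopC rest

-- split on a single newline, structurally
def pvSplitNl : List Char → List (List Char)
  | [] => [[]]
  | c :: rest => if c = '\n' then [] :: pvSplitNl rest else (pvSplitNl rest).modifyHead (c :: ·)

theorem pvSplitNl_ne_nil (cs : List Char) : pvSplitNl cs ≠ [] := by
  induction cs with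
  | nil => simp [pvSplitNl]
  | cons c rest ih =>
    by_cases h : c = '\n'
    · simp [pvSplitNl, h]
    · simp [pvSplitNl, h]
      exact ih

theorem pvSplitOn_go_eq (fuel : Nat) (l cur : List Char) (acc : List (List Char))
    (h : l.length < fuel) :
    PySem.Chars.splitOn.go ['\n'] fuel l cur acc
      = acc.reverse ++ (pvSplitNl l).modifyHead (cur.reverse ++ ·) := by
  induction fuel generalizing l cur acc with
  | zero => omega
  | succ fuel ih =>
    cases l with
    | nil => simp [PySem.Chars.splitOn.go, pvSplitNl]
    | cons c rest =>
      by_cases hc : c = '\n'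
      · subst hc
        simp only [PySem.Chars.splitOn.go, List.isPrefixOf, beq_self_eq_true, Bool.true_and,
          if_true, List.length_cons, List.length_nil, List.drop_succ_cons, List.drop_zero]
        rw [ih rest [] (cur.reverse :: acc) (by simpa using Nat.lt_of_succ_lt_succ h)]
        have hid : List.modifyHead (fun x : List Char => x) (pvSplitNl rest) = pvSplitNl rest := by
          cases pvSplitNl rest <;> simp
        simp [pvSplitNl, hid]
      · have hpre : (['\n'].isPrefixOf (c :: rest)) = false := by
          simp [List.isPrefixOf]
          exact fun hh => absurd (Eq.symm hh) hc
        simp only [PySem.Chars.splitOn.go, hpre, Bool.false_eq_true, if_false]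
        rw [ih rest (c :: cur) acc (by simpa using Nat.lt_of_succ_lt_succ h)]
        simp only [pvSplitNl, hc, if_false, List.reverse_cons]
        congr 1
        cases hsp : pvSplitNl rest with
        | nil => exact absurd hsp (pvSplitNl_ne_nil rest)
        | cons p ps => simp [List.modifyHead]

theorem pvSplitOn_eq (cs : List Char) :
    PySem.Chars.splitOn cs ['\n'] = pvSplitNl cs := by
  have h := pvSplitOn_go_eq (cs.length + 1) cs [] [] (by omega)
  have h2 : (pvSplitNl cs).modifyHead (fun x => List.reverse [] ++ x) = pvSplitNl cs := by
    cases pvSplitNl cs <;> simp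
  rw [PySem.Chars.splitOn, h, h2, List.reverse_nil, List.nil_append]

theorem pvSplitNl_no_nl (cs : List Char) (h : '\n' ∉ cs) : pvSplitNl cs = [cs] := by
  induction cs with
  | nil => rfl
  | cons c rest ih =>
    simp only [List.mem_cons, not_or] at h
    simp [pvSplitNl, Ne.symm h.1, ih h.2, List.modifyHead]

theorem pvSplitNl_step (head rest : List Char) (h : '\n' ∉ head) :
    pvSplitNl (head ++ '\n' :: rest) = head :: pvSplitNl rest := by
  induction head with
  | nil => simp [pvSplitNl]
  | cons c hd ih =>
    simp only [List.mem_cons, not_or] at h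
    simp only [List.cons_append, pvSplitNl, Ne.symm h.1, if_false]
    rw [ih h.2]
    simp [List.modifyHead]

-- the first piece of pvSplitNl is the takeWhile prefix
theorem pvSplitNl_head (cs : List Char) :
    ∃ tl, pvSplitNl cs = (cs.takeWhile (· ≠ '\n')) :: tl := by
  induction cs with
  | nil => exact ⟨[], rfl⟩
  | cons c rest ih =>
    by_cases h : c = '\n'
    · exact ⟨pvSplitNl rest, by simp [pvSplitNl, h]⟩
    · obtain ⟨tl, htl⟩ := ih
      exact ⟨tl, by simp [pvSplitNl, h, htl, List.modifyHead]⟩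

-- Source B's is_marker agrees with A's two break conditions on each line
set_option maxHeartbeats 1000000 in
theorem pvALoopC_cons (l : List Char) (rest : List (List Char)) :
    pvALoopC (l :: rest) = if pvIsMarkerC l then [] else l :: pvALoopC rest := by
  simp only [pvALoopC, pvIsMarkerC]
  by_cases hb1 : (PySem.Chars.startswith l "def main(".toList && PySem.Chars.endswith l "):".toList) = true
  · rw [if_pos hb1, if_pos (by rw [Bool.or_eq_true]; exact Or.inl hb1)]
  · by_cases hb2 : (PySem.Chars.isIn "__name__".toList l && PySem.Chars.isIn "__main__".toList l) = true
    · rw [if_neg hb1, if_pos hb2, if_pos (by rw [Bool.or_eq_true]; exact Or.inr hb2)]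
    · rw [if_neg hb1, if_neg hb2, if_neg (by rw [Bool.or_eq_true]; exact fun h => h.elim hb1 hb2)]

theorem pvNlNotMemTakeWhile (cs : List Char) :
    '\n' ∉ cs.takeWhile (fun c => decide (c ≠ '\n')) := by
  intro hmem
  have := List.mem_takeWhile_imp hmem
  simp at this

theorem pvDecomp (cs : List Char)
    (h : (cs.takeWhile (fun c => decide (c ≠ '\n'))).length ≠ cs.length) :
    cs = cs.takeWhile (fun c => decide (c ≠ '\n')) ++
      '\n' :: cs.drop ((cs.takeWhile (fun c => decide (c ≠ '\n'))).length + 1) := by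
  induction cs with
  | nil => simp at h
  | cons c rest ih =>
    by_cases hc : c = '\n'
    · subst hc
      simp
    · have htw : (c :: rest).takeWhile (fun x => decide (x ≠ '\n'))
          = c :: rest.takeWhile (fun x => decide (x ≠ '\n')) := by
        simp [hc]
      rw [htw] at h ⊢
      have h' : (rest.takeWhile (fun x => decide (x ≠ '\n'))).length ≠ rest.length := by
        simp only [List.length_cons] at h
        omega
      simp only [List.length_cons, List.drop_succ_cons, List.cons_append]
      exact congrArg (c :: ·) (ih h')

-- if the while loop reports a cut, it is at or after the start offset
theorem pvFindCut_le_aux (n : Nat) : ∀ cs : List Char, cs.length ≤ n → ∀ pos k : Nat,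
    pvFindCut pos cs = some k → pos ≤ k := by
  induction n with
  | zero =>
    intro cs hcs pos k h
    have hnil : cs = [] := List.eq_nil_of_length_eq_zero (Nat.le_zero.mp hcs)
    subst hnil
    rw [pvFindCut] at h
    simp [show pvIsMarkerC [] = false from by decide] at h
  | succ n ih =>
    intro cs hcs pos k h
    rw [pvFindCut] at h
    split_ifs at h with hm hl
    · exact Nat.le_of_eq (Option.some.inj h)
    · have hlen := (List.takeWhile_prefix (l := cs) (fun c => decide (c ≠ '\n'))).length_le
      have hb := ih _ (by simp only [List.length_drop]; omega) _ k h
      omega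

theorem pvFindCut_le (cs : List Char) (pos k : Nat) (h : pvFindCut pos cs = some k) : pos ≤ k :=
  pvFindCut_le_aux cs.length cs le_rfl pos k h

-- MAIN LEMMA: A's join-of-kept-lines is B's single slice, at any start offset
theorem pvMainGen (n : Nat) : ∀ cs : List Char, cs.length ≤ n → ∀ pos : Nat,
    PySem.Chars.join ['\n'] (pvALoopC (pvSplitNl cs)) =
      (match pvFindCut pos cs with
       | none => cs
       | some k => cs.take (k - pos - 1)) := by
  induction n with
  | zero =>
    intro cs hcs pos
    have hnil : cs = [] := List.eq_nil_of_length_eq_zero (Nat.le_zero.mp hcs)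
    subst hnil
    rw [pvFindCut]
    simp [pvSplitNl, pvALoopC_cons, show pvIsMarkerC [] = false from by decide, pvALoopC,
      PySem.Chars.join_singleton]
  | succ n ih =>
    intro cs hcs pos
    by_cases hm : pvIsMarkerC (cs.takeWhile (fun c => decide (c ≠ '\n')))
    · rw [pvFindCut, if_pos hm]
      obtain ⟨tl, htl⟩ := pvSplitNl_head cs
      rw [htl, pvALoopC_cons, if_pos hm, PySem.Chars.join_nil]
      simp
    · by_cases hl : (cs.takeWhile (fun c => decide (c ≠ '\n'))).length = cs.length
      · have hcseq : cs.takeWhile (fun c => decide (c ≠ '\n')) = cs :=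
          (List.takeWhile_prefix _).eq_of_length hl
        have hnn : '\n' ∉ cs := by
          intro hmem; rw [← hcseq] at hmem; exact pvNlNotMemTakeWhile cs hmem
        rw [pvFindCut, if_neg hm, if_pos hl]
        rw [pvSplitNl_no_nl cs hnn, pvALoopC_cons, if_neg (hcseq ▸ hm)]
        simp [pvALoopC, PySem.Chars.join_singleton]
      · have hdec := pvDecomp cs hl
        have hrlen : (cs.drop ((cs.takeWhile (fun c => decide (c ≠ '\n'))).length + 1)).length ≤ n := by
          have hlen := (List.takeWhile_prefix (l := cs) (fun c => decide (c ≠ '\n'))).length_le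
          simp only [List.length_drop]
          omega
        rw [pvFindCut, if_neg hm, if_neg hl]
        have hsplit : pvSplitNl cs =
            (cs.takeWhile (fun c => decide (c ≠ '\n'))) ::
              pvSplitNl (cs.drop ((cs.takeWhile (fun c => decide (c ≠ '\n'))).length + 1)) := by
          conv_lhs => rw [hdec]
          exact pvSplitNl_step _ _ (pvNlNotMemTakeWhile cs)
        rw [hsplit, pvALoopC_cons, if_neg hm]
        set tw := cs.takeWhile (fun c => decide (c ≠ '\n')) with htw
        set rest := cs.drop (tw.length + 1) with hrest
        have ihr := ih rest hrlen (pos + tw.length + 1)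
        obtain ⟨tl', htl'⟩ := pvSplitNl_head rest
        have hne : pvALoopC (pvSplitNl rest) =
            (if pvIsMarkerC (rest.takeWhile (fun c => decide (c ≠ '\n'))) then []
             else (rest.takeWhile (fun c => decide (c ≠ '\n'))) :: pvALoopC tl') := by
          rw [htl', pvALoopC_cons]
        by_cases hm' : pvIsMarkerC (rest.takeWhile (fun c => decide (c ≠ '\n')))
        · have hfc : pvFindCut (pos + tw.length + 1) rest = some (pos + tw.length + 1) := by
            rw [pvFindCut, if_pos hm']
          rw [hfc, hne, if_pos hm', PySem.Chars.join_singleton]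
          show tw = List.take (pos + tw.length + 1 - pos - 1) cs
          rw [show pos + tw.length + 1 - pos - 1 = tw.length by omega]
          conv_rhs => rw [hdec]
          exact List.take_left.symm
        · rw [hne, if_neg hm'] at ihr ⊢
          cases hfc : pvFindCut (pos + tw.length + 1) rest with
          | none =>
            have ihr' : PySem.Chars.join ['\n']
                ((rest.takeWhile (fun c => decide (c ≠ '\n'))) :: pvALoopC tl') = rest := by
              rw [hfc] at ihr; exact ihr
            rw [PySem.Chars.join_cons_cons, ihr']
            show tw ++ ['\n'] ++ rest = cs
            conv_rhs => rw [hdec]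
            simp
          | some k =>
            have hk : pos + tw.length + 1 + 1 ≤ k := by
              rw [pvFindCut, if_neg hm'] at hfc
              by_cases hl' : (rest.takeWhile (fun c => decide (c ≠ '\n'))).length = rest.length
              · rw [if_pos hl'] at hfc; exact absurd hfc (by simp)
              · rw [if_neg hl'] at hfc
                have := pvFindCut_le _ _ _ hfc
                omega
            have ihr' : PySem.Chars.join ['\n']
                ((rest.takeWhile (fun c => decide (c ≠ '\n'))) :: pvALoopC tl')
                  = List.take (k - (pos + tw.length + 1) - 1) rest := by
              rw [hfc] at ihr; exact ihr
            rw [PySem.Chars.join_cons_cons, ihr']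
            show tw ++ ['\n'] ++ List.take (k - (pos + tw.length + 1) - 1) rest
                = List.take (k - pos - 1) cs
            conv_rhs => rw [hdec]
            rw [show k - pos - 1 = tw.length + (k - (pos + tw.length + 1) - 1 + 1) by omega]
            rw [List.take_append, Nat.add_sub_cancel_left, List.take_succ_cons,
              List.take_of_length_le
                (show tw.length ≤ tw.length + (k - (pos + tw.length + 1) - 1 + 1) by omega)]
            simp

theorem pvMain (cs : List Char) :
    PySem.Chars.join ['\n'] (pvALoopC (pvSplitNl cs)) =
      (match pvFindCut 0 cs with
       | none => cs
       | some k => cs.take (k - 1)) := by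
  have h := pvMainGen cs.length cs le_rfl 0
  cases hfc : pvFindCut 0 cs with
  | none => rw [hfc] at h; exact h
  | some k => rw [hfc] at h; simpa using h

-- A's String-level loop is the char-level loop under String.ofList
theorem pvALoop_map (ls : List (List Char)) :
    pvALoop (ls.map String.ofList) = (pvALoopC ls).map String.ofList := by
  induction ls with
  | nil => rfl
  | cons l rest ih =>
    simp only [List.map_cons, pvALoop, pvALoopC, PySem.Str.startswith, PySem.Str.endswith,
      PySem.Str.isIn, String.toList_ofList]
    split_ifs <;> simp [ih]

theorem pvPerSource (source : String) :
    PySem.Str.join "\n" (pvALoop ((PySem.Str.split? source "\n").getD []))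
      = (match pvFindCut 0 source.toList with
         | none => source
         | some cut => String.ofList (source.toList.take (cut - 1))) := by
  have hnl : ("\n" : String).toList = ['\n'] := by decide
  have hsplit : (PySem.Str.split? source "\n").getD []
      = (pvSplitNl source.toList).map String.ofList := by
    rw [PySem.Str.split?, PySem.Chars.split?, hnl]
    simp [pvSplitOn_eq]
  rw [hsplit, pvALoop_map, PySem.Str.join, hnl]
  have hmaps : (((pvALoopC (pvSplitNl source.toList)).map String.ofList).map String.toList)
      = pvALoopC (pvSplitNl source.toList) := by
    simp [List.map_map, Function.comp_def]
  rw [hmaps, pvMain source.toList]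
  cases hfc : pvFindCut 0 source.toList with
  | none => simp [String.ofList_toList]
  | some k => simp

-- ===== VERDICT (by name: the statement is the Claim_ definition above) =====
theorem purge_main_spec : Claim_equal_purge_main := by
  intro sources _
  unfold Spec_purge_main purge_main purge_main_alt
  rw [PySem.List.foldl_append_singleton_eq_map]
  exact List.map_congr_left (fun source _ => pvPerSource source)
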